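-- pv_equiv track=rewrite | github.com/fuentes9hugo/adventpy-exercises | 2025/3.py | drawGift
-- ===== SOURCE A (Python) =====
-- def drawGift(size, symbol):
--     if size < 2:
--         return ""
--
--     gift = []
--     for row in range(size):
--         if row not in (0, size - 1):
--             gift.append(f"{symbol}" + " " * (size - 2) + f"{symbol}")
--             continue
--
--         gift.append(f"{symbol}" * size)
--
--     return "\n".join(gift)
-- ===== SOURCE B (Python) =====
-- def drawGift(size, symbol):
--     if size < 2:
--         return ""
--     border = (0, size - 1)
--     return "\n".join(
--         "".join(f"{symbol}" if r in border or c in border else " " for c in range(size))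
--         for r in range(size)
--     )
-- ===== Notes on version B (the rewrite author's own statement) =====
-- stated objective: alternative
-- what changed: Replaces A's per-row loop that appends one of two precomposed row strings with a per-cell grid construction: every (row, col) cell is mapped to the symbol or a space by a border test and each row is joined from its cells.
import Mathlib
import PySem

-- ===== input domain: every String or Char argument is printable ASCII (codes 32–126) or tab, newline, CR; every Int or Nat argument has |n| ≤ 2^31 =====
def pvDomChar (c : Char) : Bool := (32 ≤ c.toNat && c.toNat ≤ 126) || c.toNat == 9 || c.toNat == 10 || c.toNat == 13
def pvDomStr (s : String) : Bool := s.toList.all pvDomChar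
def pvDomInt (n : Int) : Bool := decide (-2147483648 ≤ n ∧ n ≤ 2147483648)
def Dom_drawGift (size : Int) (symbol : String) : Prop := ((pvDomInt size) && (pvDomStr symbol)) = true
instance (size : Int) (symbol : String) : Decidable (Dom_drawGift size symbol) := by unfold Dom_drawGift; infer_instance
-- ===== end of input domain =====

-- B builds the picture cell by cell (each (row, col) mapped to symbol or space by a border test) instead of A's per-row loop appending one of two precomposed row strings; same return value.
-- ===== PORT A =====
def drawGift (size : Int) (symbol : String) : String :=
  if size < 2 then ""
  else
    let gift := (PySem.List.pyRange 0 size 1).foldl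
      (fun acc row =>
        if row ≠ 0 ∧ row ≠ size - 1 then
          acc ++ [String.ofList (symbol.toList ++ PySem.List.pyRepeat [' '] (size - 2) ++ symbol.toList)]
        else
          acc ++ [String.ofList (PySem.List.pyRepeat symbol.toList size)]) []
    PySem.Str.join "\n" gift

-- ===== PORT B =====
def drawGift_alt (size : Int) (symbol : String) : String :=
  if size < 2 then ""
  else
    PySem.Str.join "\n" ((PySem.List.pyRange 0 size 1).map (fun r =>
      PySem.Str.join "" ((PySem.List.pyRange 0 size 1).map (fun c =>
        if r = 0 ∨ r = size - 1 ∨ c = 0 ∨ c = size - 1 then symbol else " "))))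

-- ===== PRECONDITION & SPEC =====
def Spec_drawGift (size : Int) (symbol : String) (out : String) : Prop := out = drawGift_alt size symbol
instance (size : Int) (symbol : String) (out : String) : Decidable (Spec_drawGift size symbol out) := by unfold Spec_drawGift; infer_instance

-- ===== CLAIM (what is proved, stated in full; the proofs are below) =====
def Claim_equal_drawGift : Prop := ∀ (size : Int) (symbol : String), Dom_drawGift size symbol → Spec_drawGift size symbol (drawGift size symbol)

-- ===== LEMMAS AND PROOFS =====
-- a loop that only appends is a map
theorem foldl_append_map {α β : Type} (f : α → β) (l : List α) (init : List β) :
    l.foldl (fun acc x => acc ++ [f x]) init = init ++ l.map f := by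
  induction l generalizing init with
  | nil => simp
  | cons x t ih => simp [List.foldl, ih]

-- "".join concatenates
theorem join_empty_eq_flatten (parts : List (List Char)) :
    PySem.Chars.join [] parts = parts.flatten := by
  induction parts with
  | nil => simp [PySem.Chars.join_nil]
  | cons p rest ih =>
    cases rest with
    | nil => simp [PySem.Chars.join, List.intercalate]
    | cons q r => rw [PySem.Chars.join_cons_cons, ih]; simp

-- a border row of B: every cell is the symbol, so the row is symbol * size
theorem row_border (size : Int) (symbol : String) (r : Int)
    (hr : r = 0 ∨ r = size - 1) :
    PySem.Str.join "" ((PySem.List.pyRange 0 size 1).map (fun c =>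
        if r = 0 ∨ r = size - 1 ∨ c = 0 ∨ c = size - 1 then symbol else " "))
      = String.ofList (PySem.List.pyRepeat symbol.toList size) := by
  have hmap : (PySem.List.pyRange 0 size 1).map (fun c =>
        if r = 0 ∨ r = size - 1 ∨ c = 0 ∨ c = size - 1 then symbol else " ")
      = List.replicate size.toNat symbol := by
    rw [List.eq_replicate_iff]
    refine ⟨by simp [PySem.List.length_pyRange_one], ?_⟩
    intro b hb
    simp only [List.mem_map] at hb
    obtain ⟨c, _, rfl⟩ := hb
    rcases hr with h | h <;> simp [h]
  rw [hmap]
  unfold PySem.Str.join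
  have hnil : ("" : String).toList = ([] : List Char) := rfl
  rw [hnil, List.map_replicate, join_empty_eq_flatten]
  rfl

-- a middle row of B: symbol, size-2 spaces, symbol
theorem row_middle (size : Int) (symbol : String) (r : Int)
    (hsz : 2 ≤ size) (hr : r ≠ 0 ∧ r ≠ size - 1) :
    PySem.Str.join "" ((PySem.List.pyRange 0 size 1).map (fun c =>
        if r = 0 ∨ r = size - 1 ∨ c = 0 ∨ c = size - 1 then symbol else " "))
      = String.ofList (symbol.toList ++ PySem.List.pyRepeat [' '] (size - 2) ++ symbol.toList) := by
  rw [PySem.List.pyRange_one_append 0 1 size (by omega) (by omega),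
      PySem.List.pyRange_one_append 1 (size - 1) size (by omega) (by omega),
      PySem.List.pyRange_one_cons (show (0:Int) < 1 by omega),
      PySem.List.pyRange_one_eq_nil (show (1:Int) ≤ 0 + 1 by omega),
      PySem.List.pyRange_one_cons (show size - 1 < size by omega),
      PySem.List.pyRange_one_eq_nil (show size ≤ size - 1 + 1 by omega)]
  have hmid : (PySem.List.pyRange 1 (size - 1) 1).map (fun c =>
        if r = 0 ∨ r = size - 1 ∨ c = 0 ∨ c = size - 1 then symbol else " ")
      = List.replicate (size - 2).toNat " " := by
    rw [List.eq_replicate_iff]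
    refine ⟨by simp [PySem.List.length_pyRange_one]; omega, ?_⟩
    intro b hb
    simp only [List.mem_map] at hb
    obtain ⟨c, hc, rfl⟩ := hb
    rw [PySem.List.mem_pyRange_one] at hc
    have : ¬ (r = 0 ∨ r = size - 1 ∨ c = 0 ∨ c = size - 1) := by omega
    simp [this]
  simp only [List.map_append, List.map_cons, List.map_nil, hmid]
  simp only [true_or, or_true, if_true]
  unfold PySem.Str.join
  congr 1
  have hnil : ("" : String).toList = ([] : List Char) := rfl
  rw [hnil, List.map_append, List.map_append, List.map_replicate, join_empty_eq_flatten]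
  simp [PySem.List.pyRepeat]

-- ===== VERDICT (by name: the statement is the Claim_ definition above) =====
theorem drawGift_spec : Claim_equal_drawGift := by
  intro size symbol _
  unfold Spec_drawGift drawGift drawGift_alt
  by_cases h : size < 2
  · simp [h]
  · simp only [h, if_false]
    congr 1
    have heq : (fun (acc : List String) (row : Int) =>
        if row ≠ 0 ∧ row ≠ size - 1 then
          acc ++ [String.ofList (symbol.toList ++ PySem.List.pyRepeat [' '] (size - 2) ++ symbol.toList)]
        else acc ++ [String.ofList (PySem.List.pyRepeat symbol.toList size)])
      = fun acc row => acc ++ [if row ≠ 0 ∧ row ≠ size - 1 then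
          String.ofList (symbol.toList ++ PySem.List.pyRepeat [' '] (size - 2) ++ symbol.toList)
        else String.ofList (PySem.List.pyRepeat symbol.toList size)] := by
      funext acc row; split_ifs <;> rfl
    rw [heq, foldl_append_map, List.nil_append]
    apply List.map_congr_left
    intro r _
    by_cases hr : r ≠ 0 ∧ r ≠ size - 1
    · rw [if_pos hr]
      exact (row_middle size symbol r (by omega) hr).symm
    · have hr' : r = 0 ∨ r = size - 1 := by omega
      rw [if_neg hr]
      exact (row_border size symbol r hr').symm
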